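-- pv_equiv track=rewrite | github.com/eunhee-dev/problem-solving | 0x0c_backtracking/15650/solve.py | solve
-- ===== SOURCE A (Python) =====
-- def solve(n: int, m: int) -> list[str]:
--     sequences = []
--     path = []
--
--     def backtrack(start: int, depth: int) -> None:
--         if depth == m:
--             sequences.append(" ".join(map(str, path)))
--             return
--         for i in range(start, n+1):
--             path.append(i)
--             backtrack(i + 1, depth + 1)
--             path.pop()
--
--     backtrack(1, 0)
--     return sequences
-- ===== SOURCE B (Python) =====
-- import itertools
--
-- def solve(n: int, m: int) -> list[str]:
--     if m < 0 or m > max(n, 0):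
--         return []
--     return [" ".join(map(str, c)) for c in itertools.combinations(range(1, n + 1), m)]
-- ===== Notes on version B (the rewrite author's own statement) =====
-- stated objective: idiomatic
-- what changed: Replaces the hand-written mutable-path backtracking recursion with a comprehension over itertools.combinations of range(1, n+1), which yields the same lexicographic order; a guard returns [] when m < 0 or m > max(n, 0), where combinations would raise or be degenerate.
import Mathlib
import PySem

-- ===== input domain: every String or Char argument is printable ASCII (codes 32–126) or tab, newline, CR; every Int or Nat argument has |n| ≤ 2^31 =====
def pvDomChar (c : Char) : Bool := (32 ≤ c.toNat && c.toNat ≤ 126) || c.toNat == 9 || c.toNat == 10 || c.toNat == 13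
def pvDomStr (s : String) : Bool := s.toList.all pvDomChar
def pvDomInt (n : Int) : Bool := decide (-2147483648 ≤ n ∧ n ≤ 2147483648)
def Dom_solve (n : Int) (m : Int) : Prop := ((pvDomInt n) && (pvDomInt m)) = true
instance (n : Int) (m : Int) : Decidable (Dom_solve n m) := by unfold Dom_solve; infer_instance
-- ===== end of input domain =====

-- B replaces A's mutable-path backtracking with a comprehension over combinations of range(1, n+1) (idiomatic; same order and cost).

-- ===== PORT A =====
-- A's nested `backtrack` mutates `sequences` and `path`; ported as a recursion returning
-- the sequences it appends, with the `for i in range(start, n+1)` loop rendered as the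
-- tail recursion on `start` (the second call `solveBT n m (start+1) depth path`).
def solveBT (n m : Int) (start depth : Int) (path : List Int) : List String :=
  if depth = m then
    [PySem.Str.join " " (path.map PySem.Int.toStr)]
  else if _h : start ≤ n then
    solveBT n m (start + 1) (depth + 1) (path ++ [start]) ++ solveBT n m (start + 1) depth path
  else
    []
termination_by (n + 1 - start).toNat
decreasing_by all_goals omega

def solve (n : Int) (m : Int) : List String := solveBT n m 1 0 []

-- ===== PORT B =====
-- itertools.combinations(xs, k) in its lexicographic emission order
def pyCombinations (xs : List Int) (k : Nat) : List (List Int) :=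
  match k, xs with
  | 0, _ => [[]]
  | _ + 1, [] => []
  | k + 1, x :: rest =>
      (pyCombinations rest k).map (fun c => x :: c) ++ pyCombinations rest (k + 1)

def solve_alt (n : Int) (m : Int) : List String :=
  if m < 0 ∨ max n 0 < m then []
  else (pyCombinations (PySem.List.pyRange 1 (n + 1) 1) m.toNat).map
         (fun c => PySem.Str.join " " (c.map PySem.Int.toStr))

-- ===== PRECONDITION & SPEC =====
-- Pre_ excludes inputs whose backtracking nests ~1000 Python frames deep (n for m < 0, min n m
-- otherwise), where CPython A raises RecursionError; the bound 900 leaves margin below the limit.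
def Pre_solve (n : Int) (m : Int) : Prop := (if m < 0 then n else min n m) < 900
instance (n : Int) (m : Int) : Decidable (Pre_solve n m) := by unfold Pre_solve; infer_instance
def pvWitness_solve : Int × Int := (4, 2)
def Spec_solve (n : Int) (m : Int) (out : List String) : Prop := out = solve_alt n m
instance (n : Int) (m : Int) (out : List String) : Decidable (Spec_solve n m out) := by unfold Spec_solve; infer_instance

-- ===== CLAIM (what is proved, stated in full; the proofs are below) =====
def Claim_equal_solve : Prop := ∀ (n : Int) (m : Int), Dom_solve n m → Pre_solve n m → Spec_solve n m (solve n m)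

-- ===== LEMMAS AND PROOFS =====

-- when depth has overshot m (only possible when m < depth from the start), nothing is ever emitted
theorem solveBT_of_lt (n m : Int) : ∀ (f : Nat) (start depth : Int) (path : List Int),
    (n + 1 - start).toNat ≤ f → m < depth → solveBT n m start depth path = [] := by
  intro f
  induction f with
  | zero =>
    intro start depth path hf hm
    unfold solveBT
    rw [if_neg (by omega), dif_neg (by omega)]
  | succ f ih =>
    intro start depth path hf hm
    unfold solveBT
    rw [if_neg (by omega)]
    by_cases h : start ≤ n
    · rw [dif_pos h, ih _ _ _ (by omega) (by omega), ih _ _ _ (by omega) (by omega)]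
      simp
    · rw [dif_neg h]

-- the backtracking recursion emits exactly the combinations of the remaining range,
-- each prefixed with the accumulated path
theorem solveBT_eq_combinations (n m : Int) : ∀ (f : Nat) (start depth : Int) (path : List Int),
    (n + 1 - start).toNat ≤ f → depth ≤ m →
    solveBT n m start depth path =
      (pyCombinations (PySem.List.pyRange start (n + 1) 1) (m - depth).toNat).map
        (fun c => PySem.Str.join " " ((path ++ c).map PySem.Int.toStr)) := by
  intro f
  induction f with
  | zero =>
    intro start depth path hf hd
    have hsn : n < start := by omega
    unfold solveBT
    rw [PySem.List.pyRange_one_eq_nil (by omega)]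
    by_cases hdm : depth = m
    · rw [if_pos hdm]
      have : (m - depth).toNat = 0 := by omega
      simp [this, pyCombinations]
    · rw [if_neg hdm, dif_neg (by omega)]
      have : ∃ k, (m - depth).toNat = k + 1 := ⟨(m - depth).toNat - 1, by omega⟩
      obtain ⟨k, hk⟩ := this
      simp [hk, pyCombinations]
  | succ f ih =>
    intro start depth path hf hd
    unfold solveBT
    by_cases hdm : depth = m
    · rw [if_pos hdm]
      have : (m - depth).toNat = 0 := by omega
      simp [this, pyCombinations]
    · rw [if_neg hdm]
      have hk : ∃ k, (m - depth).toNat = k + 1 := ⟨(m - depth).toNat - 1, by omega⟩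
      obtain ⟨k, hk⟩ := hk
      by_cases h : start ≤ n
      · rw [dif_pos h]
        rw [PySem.List.pyRange_one_cons (by omega), hk]
        show _ = (pyCombinations (start :: _) (k + 1)).map _
        rw [pyCombinations]
        rw [List.map_append, List.map_map]
        have h1 := ih (start + 1) (depth + 1) (path ++ [start]) (by omega) (by omega)
        have h2 := ih (start + 1) depth path (by omega) (by omega)
        have hk1 : (m - (depth + 1)).toNat = k := by omega
        rw [h1, h2, hk1, hk]
        congr 1
        apply List.map_congr_left
        intro c _
        simp
      · rw [dif_neg h]
        rw [PySem.List.pyRange_one_eq_nil (by omega), hk]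
        simp [pyCombinations]

theorem pyCombinations_eq_nil : ∀ (xs : List Int) (k : Nat), xs.length < k →
    pyCombinations xs k = [] := by
  intro xs
  induction xs with
  | nil => intro k hk; match k, hk with
    | k + 1, _ => rfl
  | cons x rest ih =>
    intro k hk
    match k, hk with
    | k + 1, hk =>
      show (pyCombinations rest k).map _ ++ pyCombinations rest (k + 1) = []
      rw [ih k (by simpa using hk), ih (k + 1) (by simp at hk ⊢; omega)]
      rfl

-- ===== VERDICT (by name: the statement is the Claim_ definition above) =====
theorem solve_spec : Claim_equal_solve := by
  intro n m _ _
  unfold Spec_solve solve solve_alt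
  by_cases hm : m < 0 ∨ max n 0 < m
  · rw [if_pos hm]
    rcases hm with hm | hm
    · exact solveBT_of_lt n m (n + 1 - 1).toNat 1 0 [] (by omega) (by omega)
    · rw [solveBT_eq_combinations n m (n + 1 - 1).toNat 1 0 [] (by omega) (by omega),
          pyCombinations_eq_nil _ _ (by rw [PySem.List.length_pyRange_one]; omega)]
      rfl
  · rw [if_neg hm,
        solveBT_eq_combinations n m (n + 1 - 1).toNat 1 0 [] (by omega) (by omega)]
    have : (m - 0).toNat = m.toNat := by omega
    rw [this]
    simp
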